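-- pv_equiv track=rewrite | github.com/BennyJane/algorithm_mad | leetcode/ClassicQuestion/scoreOfParentheses.py | expand2
-- ===== SOURCE A (Python) =====
-- from typing import List
--
-- def expand2(s: str) -> List[str]:
--
--     def dfs(prefix: str, s: str) -> None:
--         # ---- 剪枝
--         if not s:
--             res.append(prefix)
--             return
--         # ---------- 第一个是‘{’
--         if s[0].isalpha() == 0:
--             tmp = ""
--             i = 0
--             while i < len(s):
--                 if s[i] == '}':
--                     tmp = s[1:i]
--                     break
--                 i += 1
--             tmp = tmp.split(',')
--             tmp.sort()
--             for c in tmp: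
--                 dfs(prefix + c, s[i + 1:])
--         # ---------- 第一个是子母
--         else:
--             i = 0
--             while i < len(s):
--                 if s[i] == '{':
--                     break
--                 i += 1
--             dfs(prefix + s[:i], s[i:])
--
--     res = []
--     dfs("", s)
--     return res
-- ===== SOURCE B (Python) =====
-- from typing import List
--
-- def expand2(s: str) -> List[str]:
--     res = [""]
--     while s:
--         if s[0].isalpha():
--             lit, sep, rest = s.partition('{')
--             opts, s = [lit], sep + rest
--         else:
--             grp, sep, rest = s.partition('}')
--             opts = sorted(grp[1:].split(',')) if sep else ['']
--             s = rest
--         res = [r + c for r in res for c in opts]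
--     return res
-- ===== Notes on version B (the rewrite author's own statement) =====
-- stated objective: faster
-- what changed: A's recursive DFS, which re-scans, re-splits and re-sorts the remaining string once per partial prefix, is replaced by a single iterative left-to-right parse (str.partition per segment) that handles each segment exactly once and extends all accumulated combinations segment by segment.
import Mathlib
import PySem

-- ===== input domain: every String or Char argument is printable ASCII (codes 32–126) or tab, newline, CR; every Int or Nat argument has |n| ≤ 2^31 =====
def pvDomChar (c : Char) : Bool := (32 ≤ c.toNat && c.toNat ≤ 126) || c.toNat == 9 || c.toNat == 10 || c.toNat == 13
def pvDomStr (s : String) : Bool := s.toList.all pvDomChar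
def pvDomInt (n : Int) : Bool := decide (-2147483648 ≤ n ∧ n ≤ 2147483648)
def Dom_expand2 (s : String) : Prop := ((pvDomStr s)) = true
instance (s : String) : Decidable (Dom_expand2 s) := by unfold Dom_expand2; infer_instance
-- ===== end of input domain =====

-- B replaces A's recursive DFS (which re-scans, re-splits and re-sorts the rest of the string
-- once per partial prefix) by a single left-to-right iterative parse that extends all partial
-- results segment by segment; same return value on every input.

-- ===== PORT A =====
-- A's 'while i < len(s): if s[i] == c: break; i += 1' scan: first index with s[i] = c, else s.length
def pvScan (c : Char) : List Char → Nat
  | [] => 0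
  | x :: t => if x = c then 0 else pvScan c t + 1

-- port of A's dfs(prefix, s), returning the list of strings it appends to res, in order.
-- fuel only makes the recursion structural; expand2 passes |s| + 1, which is never exhausted
-- (each call strictly shortens s).
def pvDfs : Nat → List Char → List Char → List (List Char)
  | 0, _, _ => []
  | n + 1, pre, s =>
    match s with
    | [] => [pre]
    | x :: t =>
      if PySem.Chars.isalpha x = false then
        -- brace branch: scan for '}'; tmp = s[1:i] if the break fired (else the initial ""), split, sort, loop
        let i := pvScan '}' (x :: t)
        let tmp := if i < (x :: t).length then PySem.List.slice (x :: t) (some 1) (some (i : Int)) else []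
        let tmp2 := PySem.List.sorted (PySem.Chars.splitOn tmp [',']) (fun y => y) false
        tmp2.foldl (fun acc c => acc ++ pvDfs n (pre ++ c) ((x :: t).drop (i + 1))) []
      else
        -- letter branch: scan for '{', recurse on prefix + s[:i], s[i:]
        let i := pvScan '{' (x :: t)
        pvDfs n (pre ++ (x :: t).take i) ((x :: t).drop i)

def expand2 (s : String) : List String :=
  (pvDfs (s.toList.length + 1) [] s.toList).map (fun cs => String.ofList cs)

-- ===== PORT B =====
-- str.partition(c) for a one-char separator, exact: (head, sep-found?, tail)
def pvPart (c : Char) : List Char → List Char × Bool × List Char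
  | [] => ([], false, [])
  | x :: t =>
    if x = c then ([], true, t)
    else
      let r := pvPart c t
      (x :: r.1, r.2.1, r.2.2)

-- port of B's while-loop: res holds all combinations of the consumed part of s.
-- fuel only makes the loop structural; expand2_alt passes |s| + 1, never exhausted.
def pvLoop : Nat → List (List Char) → List Char → List (List Char)
  | 0, _, _ => []
  | n + 1, res, s =>
    match s with
    | [] => res
    | x :: t =>
      if PySem.Chars.isalpha x then
        -- lit, sep, rest = s.partition('{'); opts, s = [lit], sep + rest
        let p := pvPart '{' (x :: t)
        let s' := if p.2.1 then '{' :: p.2.2 else p.2.2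
        pvLoop n (res.flatMap fun r => [p.1].map (r ++ ·)) s'
      else
        -- grp, sep, rest = s.partition('}'); opts = sorted(grp[1:].split(',')) if sep else ['']; s = rest
        let p := pvPart '}' (x :: t)
        let opts := if p.2.1 then
            PySem.List.sorted (PySem.Chars.splitOn (PySem.List.slice p.1 (some 1) none) [',']) (fun y => y) false
          else [[]]
        pvLoop n (res.flatMap fun r => opts.map (r ++ ·)) p.2.2

def expand2_alt (s : String) : List String :=
  (pvLoop (s.toList.length + 1) [[]] s.toList).map (fun cs => String.ofList cs)

-- ===== PRECONDITION & SPEC =====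
def Spec_expand2 (s : String) (out : List String) : Prop := out = expand2_alt s
instance (s : String) (out : List String) : Decidable (Spec_expand2 s out) := by unfold Spec_expand2; infer_instance

-- ===== CLAIM (what is proved, stated in full; the proofs are below) =====
def Claim_equal_expand2 : Prop := ∀ (s : String), Dom_expand2 s → Spec_expand2 s (expand2 s)

-- ===== LEMMAS AND PROOFS =====

theorem pvScan_spec (c : Char) (s : List Char) (h : pvScan c s < s.length) :
    s[pvScan c s]'h = c := by
  induction s with
  | nil => simp [pvScan] at h
  | cons x t ih =>
    by_cases hx : x = c
    · simp [pvScan, hx]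
    · have h' : pvScan c t < t.length := by
        simp only [pvScan, if_neg hx, List.length_cons] at h
        omega
      simp only [pvScan, if_neg hx]
      rw [List.getElem_cons_succ]
      exact ih h' 

theorem pvPart_eq (c : Char) (s : List Char) :
    pvPart c s =
      if pvScan c s < s.length
      then (s.take (pvScan c s), true, s.drop (pvScan c s + 1))
      else (s, false, []) := by
  induction s with
  | nil => simp [pvPart, pvScan]
  | cons x t ih =>
    by_cases hx : x = c
    · subst hx
      simp [pvPart, pvScan]
    · have hstep : pvPart c (x :: t) =
          (x :: (pvPart c t).1, (pvPart c t).2.1, (pvPart c t).2.2) := by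
        simp [pvPart, hx]
      have hsc : pvScan c (x :: t) = pvScan c t + 1 := by simp [pvScan, hx]
      rw [hstep, ih, hsc]
      by_cases hf : pvScan c t < t.length
      · rw [if_pos hf, if_pos (by simp; omega)]
        simp
      · rw [if_neg hf, if_neg (by simp; omega)]

theorem pvFlatMap_single {α β : Type} (l : List α) (g : α → β) :
    l.flatMap (fun r => [g r]) = l.map g := by
  induction l with
  | nil => rfl
  | cons a l ih => simp [List.flatMap_cons, ih]

theorem pvFlatMap_nil {α β : Type} (l : List α) :
    l.flatMap (fun _ => ([] : List β)) = [] := by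
  induction l with
  | nil => rfl
  | cons a l ih => simp [List.flatMap_cons, ih]

theorem pvLoop_eq : ∀ (n : Nat) (res : List (List Char)) (s : List Char),
    pvLoop n res s = res.flatMap (fun r => pvDfs n r s) := by
  intro n
  induction n with
  | zero =>
    intro res s
    show ([] : List (List Char)) = res.flatMap (fun r => pvDfs 0 r s)
    rw [show (fun r => pvDfs 0 r s) = (fun _ => ([] : List (List Char))) from rfl,
      pvFlatMap_nil res]
  | succ n ih =>
    intro res s
    match s with
    | [] => simp [pvLoop, pvDfs]
    | x :: t =>
      by_cases ha : PySem.Chars.isalpha x = true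
      · -- letter branch
        set i := pvScan '{' (x :: t) with hi
        have hstep : pvLoop (n + 1) res (x :: t) =
            pvLoop n (res.map (· ++ (x :: t).take i)) ((x :: t).drop i) := by
          rw [pvLoop]
          rw [if_pos ha, pvPart_eq]
          by_cases hf : pvScan '{' (x :: t) < (x :: t).length
          · have hc : (x :: t)[pvScan '{' (x :: t)]'hf = '{' := pvScan_spec _ _ hf
            rw [if_pos hf]
            have hdrop : (x :: t).drop i = '{' :: (x :: t).drop (i + 1) := by
              rw [hi, List.drop_eq_getElem_cons hf, hc]
            rw [hdrop]
            simp only [List.map_singleton, if_true]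
            rw [pvFlatMap_single res (fun r => r ++ (x :: t).take i)]
          · rw [if_neg hf]
            have hge : (x :: t).length ≤ i := by rw [hi]; omega
            rw [List.take_of_length_le hge, List.drop_of_length_le hge]
            simp only [List.map_singleton, Bool.false_eq_true, if_false]
            rw [pvFlatMap_single res (fun r => r ++ (x :: t))]
        rw [hstep, ih, List.flatMap_map]
        refine List.flatMap_congr (fun r _ => ?_)
        conv_rhs => rw [pvDfs]
        rw [if_neg (by simp [ha] : ¬ (PySem.Chars.isalpha x = false))]
      · -- brace branch
        have hfa : PySem.Chars.isalpha x = false := by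
          revert ha; cases PySem.Chars.isalpha x <;> simp
        set i := pvScan '}' (x :: t) with hi
        have hstep : pvLoop (n + 1) res (x :: t) =
            pvLoop n (res.flatMap fun r =>
              (PySem.List.sorted (PySem.Chars.splitOn
                (if i < (x :: t).length then PySem.List.slice (x :: t) (some 1) (some (i : Int)) else [])
                [',']) (fun y => y) false).map (r ++ ·)) ((x :: t).drop (i + 1)) := by
          rw [pvLoop]
          rw [if_neg (by simp [hfa] : ¬ (PySem.Chars.isalpha x = true)), pvPart_eq]
          by_cases hf : pvScan '}' (x :: t) < (x :: t).length
          · rw [if_pos hf]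
            have hopts : PySem.List.slice ((x :: t).take i) (some 1) none =
                (if i < (x :: t).length then PySem.List.slice (x :: t) (some 1) (some (i : Int)) else []) := by
              rw [if_pos (hi ▸ hf), PySem.List.slice_from_one,
                PySem.List.slice_toNat _ (by omega) (by omega)]
              simp only [Int.toNat_one, Int.toNat_natCast]
              rw [← List.drop_one, List.drop_take]
            simp only [if_true, ← hi, hopts]
          · rw [if_neg hf]
            have hge : (x :: t).length ≤ i := by rw [hi]; omega
            have hopts : (PySem.List.sorted (PySem.Chars.splitOn
                (if i < (x :: t).length then PySem.List.slice (x :: t) (some 1) (some (i : Int)) else [])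
                [',']) (fun y => y) false) = [[]] := by
              rw [if_neg (by omega)]
              decide
            have hge' : t.length ≤ i := by simp only [List.length_cons] at hge; omega
            simp only [hopts, Bool.false_eq_true, if_false, List.drop_succ_cons,
              List.drop_of_length_le hge']
        rw [hstep, ih, List.flatMap_assoc]
        refine List.flatMap_congr (fun r _ => ?_)
        rw [List.flatMap_map]
        conv_rhs => rw [pvDfs]
        rw [if_pos hfa]
        rw [PySem.List.foldl_append_eq_flatMap]
        simp only [List.nil_append, ← hi]

-- ===== VERDICT (by name: the statement is the Claim_ definition above) =====
theorem expand2_spec : Claim_equal_expand2 := by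
  intro s _
  unfold Spec_expand2 expand2 expand2_alt
  rw [pvLoop_eq]
  simp
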